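-- pv_equiv track=rewrite | github.com/apache/subversion | tools/server-side/svnpredumpfilter.py | compare_paths
-- ===== SOURCE A (Python) =====
-- def compare_paths(path1, path2):
--   # Are the paths exactly the same?
--   if path1 == path2:
--     return 0
--
--   # Skip past common prefix
--   path1_len = len(path1);
--   path2_len = len(path2);
--   min_len = min(path1_len, path2_len)
--   i = 0
--   while (i < min_len) and (path1[i] == path2[i]):
--     i = i + 1
--
--   # Children of paths are greater than their parents, but less than
--   # greater siblings of their parents
--   char1 = '\0'
--   char2 = '\0'
--   if (i < path1_len):
--     char1 = path1[i]
--   if (i < path2_len):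
--     char2 = path2[i]
--
--   if (char1 == '/') and (i == path2_len):
--     return 1
--   if (char2 == '/') and (i == path1_len):
--     return -1
--   if (i < path1_len) and (char1 == '/'):
--     return -1
--   if (i < path2_len) and (char2 == '/'):
--     return 1
--
--   # Common prefix was skipped above, next character is compared to
--   # determine order
--   return cmp(char1, char2)
-- ===== SOURCE B (Python) =====
-- def compare_paths(path1, path2):
--     # Segment-level comparison: compare '/'-split component lists lexicographically.
--     def cmp3(x, y):
--         return (x > y) - (x < y)
--     comps1 = path1.split('/')
--     comps2 = path2.split('/')
--     for c1, c2 in zip(comps1, comps2):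
--         if c1 != c2:
--             return cmp3(c1, c2)
--     return cmp3(len(comps1), len(comps2))
-- ===== Notes on version B (the rewrite author's own statement) =====
-- stated objective: idiomatic
-- what changed: Replaces the character-by-character common-prefix scan with its '\0' sentinel and four slash special-cases by splitting both paths on '/' and comparing the component lists lexicographically (Python-2-cmp convention).
-- crash fix: A raises NameError (it calls the Python-2-only builtin cmp) whenever the paths differ and neither path has '/' at the first differing position; B returns the ordinary -1/1 comparison value there. — e.g. on compare_paths("a", "b"): A raises NameError, B returns -1
import Mathlib
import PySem

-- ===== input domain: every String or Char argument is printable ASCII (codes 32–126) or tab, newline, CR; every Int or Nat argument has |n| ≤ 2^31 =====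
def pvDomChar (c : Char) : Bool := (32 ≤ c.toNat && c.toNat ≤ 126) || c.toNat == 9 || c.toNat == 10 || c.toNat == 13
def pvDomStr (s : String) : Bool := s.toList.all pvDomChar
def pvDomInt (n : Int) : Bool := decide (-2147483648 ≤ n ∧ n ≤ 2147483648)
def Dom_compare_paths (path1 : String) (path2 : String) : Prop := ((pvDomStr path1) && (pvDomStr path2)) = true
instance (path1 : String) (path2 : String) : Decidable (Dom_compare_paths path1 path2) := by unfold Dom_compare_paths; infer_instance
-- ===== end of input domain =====

-- B replaces A's character-by-character prefix scan and sentinel/slash case analysis by an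
-- idiomatic segment-level comparison of the '/'-split component lists; same return value.

-- ===== PORT A =====
-- Python 2 cmp on single characters
def pvCmpChar (c d : Char) : Int := if c = d then 0 else if c < d then -1 else 1

-- the while loop: i advances while i < min_len and path1[i] == path2[i]
def pvSkipLen : List Char → List Char → Nat
  | c :: a, d :: b => if c = d then pvSkipLen a b + 1 else 0
  | _, _ => 0

-- body of A after the equality shortcut
def pvAcore (p1 p2 : List Char) : Int :=
  let path1_len := p1.length
  let path2_len := p2.length
  let i := pvSkipLen p1 p2
  let char1 := if i < path1_len then p1.getD i (Char.ofNat 0) else Char.ofNat 0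
  let char2 := if i < path2_len then p2.getD i (Char.ofNat 0) else Char.ofNat 0
  if char1 = '/' ∧ i = path2_len then 1
  else if char2 = '/' ∧ i = path1_len then -1
  else if i < path1_len ∧ char1 = '/' then -1
  else if i < path2_len ∧ char2 = '/' then 1
  else pvCmpChar char1 char2

def compare_paths (path1 : String) (path2 : String) : Int :=
  if path1 = path2 then 0 else pvAcore path1.toList path2.toList

-- ===== PORT B =====
-- path.split('/') on the character list
def pvSplitSlash : List Char → List (List Char)
  | [] => [[]]
  | c :: r =>
    if c = '/' then [] :: pvSplitSlash r
    else match pvSplitSlash r with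
         | [] => [[c]]
         | s :: rest => (c :: s) :: rest

-- cmp3 on two (unequal) strings: Python string comparison
def pvCmpSeg : List Char → List Char → Int
  | [], [] => 0
  | [], _ :: _ => -1
  | _ :: _, [] => 1
  | c :: s, d :: t => if c = d then pvCmpSeg s t else if c < d then -1 else 1

-- the zip loop plus the final cmp3 on the lengths
def pvCmpComps : List (List Char) → List (List Char) → Int
  | [], [] => 0
  | [], _ :: _ => -1
  | _ :: _, [] => 1
  | s :: ss, t :: ts => if s = t then pvCmpComps ss ts else pvCmpSeg s t

def compare_paths_alt (path1 : String) (path2 : String) : Int :=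
  pvCmpComps (pvSplitSlash path1.toList) (pvSplitSlash path2.toList)

-- ===== PRECONDITION & SPEC =====
-- position of the first difference between two character lists (length of the longest common prefix)
def pvFirstDiff (a b : List Char) : Nat := ((a.zip b).takeWhile (fun p => p.1 == p.2)).length

-- Pre_ excludes exactly the inputs on which A raises NameError in Python 3: the module was written
-- for Python 2 and the final 'return cmp(char1, char2)' line names the removed builtin 'cmp', so A
-- raises whenever the paths differ and neither path has '/' at the first differing position.
def Pre_compare_paths (path1 : String) (path2 : String) : Prop :=
  path1 = path2
  ∨ path1.toList.getD (pvFirstDiff path1.toList path2.toList) (Char.ofNat 0) = '/'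
  ∨ path2.toList.getD (pvFirstDiff path1.toList path2.toList) (Char.ofNat 0) = '/'
instance (path1 : String) (path2 : String) : Decidable (Pre_compare_paths path1 path2) := by unfold Pre_compare_paths; infer_instance
def pvWitness_compare_paths : String × String := ("trunk", "trunk/sub")

-- A raises NameError (Python-2 'cmp') whenever the paths differ and neither has '/' at the first
-- differing position; B returns the ordinary -1/1 comparison value there.
def Raises_compare_paths (path1 : String) (path2 : String) : Prop :=
  ¬ path1 = path2
  ∧ ¬ path1.toList.getD (pvFirstDiff path1.toList path2.toList) (Char.ofNat 0) = '/'
  ∧ ¬ path2.toList.getD (pvFirstDiff path1.toList path2.toList) (Char.ofNat 0) = '/'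
instance (path1 : String) (path2 : String) : Decidable (Raises_compare_paths path1 path2) := by unfold Raises_compare_paths; infer_instance
def pvRaiseWitness_compare_paths : String × String := ("a", "b")
def pvRaiseWitnessOut_compare_paths : Int := -1

def Spec_compare_paths (path1 : String) (path2 : String) (out : Int) : Prop := out = compare_paths_alt path1 path2
instance (path1 : String) (path2 : String) (out : Int) : Decidable (Spec_compare_paths path1 path2 out) := by unfold Spec_compare_paths; infer_instance

-- ===== CLAIM (what is proved, stated in full; the proofs are below) =====
def Claim_equal_compare_paths : Prop := ∀ (path1 : String) (path2 : String), Dom_compare_paths path1 path2 → Pre_compare_paths path1 path2 → Spec_compare_paths path1 path2 (compare_paths path1 path2)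
def Claim_raises_compare_paths : Prop := (∀ (path1 : String) (path2 : String), Dom_compare_paths path1 path2 → Raises_compare_paths path1 path2 → ¬ Pre_compare_paths path1 path2) ∧ (Dom_compare_paths (pvRaiseWitness_compare_paths.1) (pvRaiseWitness_compare_paths.2) ∧ Raises_compare_paths (pvRaiseWitness_compare_paths.1) (pvRaiseWitness_compare_paths.2) ∧ compare_paths_alt (pvRaiseWitness_compare_paths.1) (pvRaiseWitness_compare_paths.2) = pvRaiseWitnessOut_compare_paths)

-- ===== LEMMAS AND PROOFS =====

theorem pvSplit_exists (r : List Char) : ∃ s rest, pvSplitSlash r = s :: rest := by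
  cases r with
  | nil => exact ⟨[], [], rfl⟩
  | cons c t =>
    by_cases hc : c = '/'
    · exact ⟨[], pvSplitSlash t, by simp [pvSplitSlash, hc]⟩
    · rcases h : pvSplitSlash t with _ | ⟨s, rest⟩
      · exact ⟨[c], [], by simp [pvSplitSlash, hc, h]⟩
      · exact ⟨c :: s, rest, by simp [pvSplitSlash, hc, h]⟩

theorem pvCmpComps_refl (l : List (List Char)) : pvCmpComps l l = 0 := by
  induction l with
  | nil => rfl
  | cons s ls ih => simp [pvCmpComps, ih]

theorem pvAcore_cons (c : Char) (a b : List Char) :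
    pvAcore (c :: a) (c :: b) = pvAcore a b := by
  simp [pvAcore, pvSkipLen]

theorem pvBcore_cons (c : Char) (a b : List Char) :
    pvCmpComps (pvSplitSlash (c :: a)) (pvSplitSlash (c :: b))
      = pvCmpComps (pvSplitSlash a) (pvSplitSlash b) := by
  by_cases hc : c = '/'
  · simp [pvSplitSlash, hc, pvCmpComps]
  · obtain ⟨s1, r1, h1⟩ := pvSplit_exists a
    obtain ⟨s2, r2, h2⟩ := pvSplit_exists b
    simp only [pvSplitSlash, hc, if_false, h1, h2]
    by_cases hs : s1 = s2
    · simp [pvCmpComps, hs]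
    · have : (c :: s1) ≠ (c :: s2) := by simpa using hs
      simp [pvCmpComps, hs, this, pvCmpSeg]

theorem pvChar_ne_nul {c : Char} (h : pvDomChar c = true) : c ≠ Char.ofNat 0 := by
  intro hc
  subst hc
  simp [pvDomChar] at h

theorem pvNul_lt {d : Char} (hd : d ≠ Char.ofNat 0) : Char.ofNat 0 < d := by
  have hv : d.val ≠ 0 := by
    intro h; apply hd; apply Char.ext; simpa using h
  have hvn : d.val.toNat ≠ 0 := by
    intro hz; exact hv (by apply UInt32.toNat_inj.mp; simpa using hz)
  have : (0 : UInt32) < d.val := UInt32.lt_iff_toNat_lt.mpr (by simpa using Nat.pos_of_ne_zero hvn)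
  simpa [Char.lt_def, Char.ofNat, Char.ofNatAux] using this

theorem pvCore (a : List Char) : ∀ (b : List Char),
    (∀ c ∈ a, c ≠ Char.ofNat 0) → (∀ c ∈ b, c ≠ Char.ofNat 0) → a ≠ b →
    pvAcore a b = pvCmpComps (pvSplitSlash a) (pvSplitSlash b) := by
  induction a with
  | nil =>
    intro b _ hb hne
    cases b with
    | nil => exact absurd rfl hne
    | cons d b' =>
      have hd : d ≠ Char.ofNat 0 := hb d (by simp)
      obtain ⟨s2, r2, h2⟩ := pvSplit_exists b'
      by_cases hsl : d = '/'
      · subst hsl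
        have h0 : ¬ ((Char.ofNat 0) = '/') := by decide
        simp [pvAcore, pvSkipLen, pvSplitSlash, pvCmpComps, h0, h2]
      · have hlt : Char.ofNat 0 < d := pvNul_lt hd
        have hne0 : Char.ofNat 0 ≠ d := fun h => hd h.symm
        have h0 : ¬ ((Char.ofNat 0) = '/') := by decide
        simp [pvAcore, pvSkipLen, pvSplitSlash, pvCmpComps, pvCmpSeg, pvCmpChar,
              h0, hsl, h2, hne0, hlt]
  | cons c a' ih =>
    intro b ha hb hne
    have hc0 : c ≠ Char.ofNat 0 := ha c (by simp)
    cases b with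
    | nil =>
      obtain ⟨s1, r1, h1⟩ := pvSplit_exists a'
      have hnlt : ¬ (c < Char.ofNat 0) := by
        simp [Char.lt_def]
      by_cases hsl : c = '/'
      · subst hsl
        simp [pvAcore, pvSkipLen, pvSplitSlash, pvCmpComps, h1]
      · have h0 : ¬ ((Char.ofNat 0) = '/') := by decide
        simp [pvAcore, pvSkipLen, pvSplitSlash, pvCmpComps, pvCmpSeg, pvCmpChar,
              h0, hsl, h1, hc0, hnlt]
    | cons d b' =>
      by_cases hcd : c = d
      · subst hcd
        have hne' : a' ≠ b' := by intro h; exact hne (by rw [h])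
        rw [pvAcore_cons, pvBcore_cons]
        exact ih b' (fun x hx => ha x (by simp [hx])) (fun x hx => hb x (by simp [hx])) hne'
      · obtain ⟨s1, r1, h1⟩ := pvSplit_exists a'
        obtain ⟨s2, r2, h2⟩ := pvSplit_exists b'
        by_cases hc1 : c = '/'
        · subst hc1
          have hd1 : d ≠ '/' := fun h => hcd h.symm
          simp [pvAcore, pvSkipLen, pvSplitSlash, pvCmpComps, pvCmpSeg,
                hcd, hd1, h1, h2]
        · by_cases hd1 : d = '/'
          · subst hd1
            simp [pvAcore, pvSkipLen, pvSplitSlash, pvCmpComps, pvCmpSeg,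
                  hcd, h1, h2]
          · have hne12 : (c :: s1) ≠ (d :: s2) := by
              intro h; exact hcd (by injection h)
            simp [pvAcore, pvSkipLen, pvSplitSlash, pvCmpComps, pvCmpSeg, pvCmpChar,
                  hcd, hc1, hd1, h1, h2, hne12]

-- ===== VERDICT (by name: the statement is the Claim_ definition above) =====
theorem compare_paths_spec : Claim_equal_compare_paths := by
  intro p1 p2 hdom _
  show compare_paths p1 p2 = compare_paths_alt p1 p2
  unfold Dom_compare_paths at hdom
  simp only [Bool.and_eq_true, pvDomStr, List.all_eq_true] at hdom
  by_cases h : p1 = p2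
  · subst h
    simp [compare_paths, compare_paths_alt, pvCmpComps_refl]
  · have hl : p1.toList ≠ p2.toList := by
      intro hli; exact h (by apply String.ext; exact hli)
    simp only [compare_paths, compare_paths_alt, if_neg h]
    exact pvCore p1.toList p2.toList
      (fun c hc => pvChar_ne_nul (hdom.1 c hc))
      (fun c hc => pvChar_ne_nul (hdom.2 c hc)) hl

@[simp] theorem compare_paths_raises : Claim_raises_compare_paths := by
  unfold Claim_raises_compare_paths
  exact ⟨fun p1 p2 _ hr hp => hp.elim hr.1 (fun h2 => h2.elim hr.2.1 hr.2.2), by decide⟩
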